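-- pv_equiv track=rewrite | github.com/Aaronmac03/browser-use | test_enhanced_dom.py | create_large_dom_content
-- ===== SOURCE A (Python) =====
-- def create_large_dom_content(size_chars: int) -> str:
--     """Create a realistic large DOM content for testing."""
--     base_content = """
--     <html><head><title>E-commerce Product Page</title></head><body>
--     <nav>
--         <ul>
--             <li><a href="/home">Home</a></li>
--             <li><a href="/products">Products</a></li>
--             <li><a href="/cart">Cart (3 items)</a></li>
--             <li><a href="/account">My Account</a></li>
--         </ul>
--     </nav>
--     <main>
--         <div class="product-container">
--             <h1>Premium Wireless Headphones</h1>
--             <div class="product-images">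
--                 <img src="/images/headphones-main.jpg" alt="Main product image" />
--                 <img src="/images/headphones-side.jpg" alt="Side view" />
--                 <img src="/images/headphones-detail.jpg" alt="Detail view" />
--             </div>
--             <div class="product-details">
--                 <p class="price">$299.99 <span class="original">$399.99</span></p>
--                 <p class="description">Experience premium audio quality with these state-of-the-art wireless headphones featuring active noise cancellation, 30-hour battery life, and premium comfort padding.</p>
--                 <ul class="features">
--                     <li>Active Noise Cancellation (ANC)</li>
--                     <li>30-hour battery life with fast charging</li>
--                     <li>Premium memory foam padding</li>
--                     <li>Bluetooth 5.2 connectivity</li>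
--                     <li>Touch controls for music and calls</li>
--                     <li>Foldable design for easy travel</li>
--                 </ul>
--                 <div class="buttons">
--                     <button id="add-to-cart" class="primary-btn">Add to Cart</button>
--                     <button id="buy-now" class="secondary-btn">Buy Now</button>
--                     <button id="wishlist" class="icon-btn">♡ Add to Wishlist</button>
--                 </div>
--             </div>
--         </div>
--         <section class="reviews">
--             <h2>Customer Reviews (4.8/5 stars)</h2>
--     """
--
--     # Add repetitive review content to reach target size
--     review_template = """
--             <div class="review">
--                 <div class="reviewer">John D. - Verified Purchase</div>
--                 <div class="rating">★★★★★</div>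
--                 <div class="review-text">Amazing sound quality! The noise cancellation works perfectly for my daily commute. Battery life is exactly as advertised - I charge them once a week with heavy use. Highly recommended for anyone looking for premium wireless headphones.</div>
--             </div>
--     """
--
--     current_content = base_content
--     while len(current_content) < size_chars:
--         current_content += review_template
--
--     current_content += """
--         </section>
--         <footer>
--             <div class="footer-links">
--                 <a href="/shipping">Shipping Info</a>
--                 <a href="/returns">Returns</a>
--                 <a href="/support">Support</a>
--                 <a href="/warranty">Warranty</a>
--             </div>
--         </footer>
--     </main></body></html>
--     """
--
--     return current_content[:size_chars]
-- ===== SOURCE B (Python) =====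
-- def create_large_dom_content(size_chars: int) -> str:
--     """Create a realistic large DOM content for testing."""
--     base_content = '\n    <html><head><title>E-commerce Product Page</title></head><body>\n    <nav>\n        <ul>\n            <li><a href="/home">Home</a></li>\n            <li><a href="/products">Products</a></li>\n            <li><a href="/cart">Cart (3 items)</a></li>\n            <li><a href="/account">My Account</a></li>\n        </ul>\n    </nav>\n    <main>\n        <div class="product-container">\n            <h1>Premium Wireless Headphones</h1>\n            <div class="product-images">\n                <img src="/images/headphones-main.jpg" alt="Main product image" />\n                <img src="/images/headphones-side.jpg" alt="Side view" />\n                <img src="/images/headphones-detail.jpg" alt="Detail view" />\n            </div>\n            <div class="product-details">\n                <p class="price">$299.99 <span class="original">$399.99</span></p>\n                <p class="description">Experience premium audio quality with these state-of-the-art wireless headphones featuring active noise cancellation, 30-hour battery life, and premium comfort padding.</p>\n                <ul class="features">\n                    <li>Active Noise Cancellation (ANC)</li>\n                    <li>30-hour battery life with fast charging</li>\n                    <li>Premium memory foam padding</li>\n                    <li>Bluetooth 5.2 connectivity</li>\n                    <li>Touch controls for music and calls</li>\n                    <li>Foldable design for easy travel</li>\n                </ul>\n                <div class="buttons">\n                    <button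 id="add-to-cart" class="primary-btn">Add to Cart</button>\n                    <button id="buy-now" class="secondary-btn">Buy Now</button>\n                    <button id="wishlist" class="icon-btn">♡ Add to Wishlist</button>\n                </div>\n            </div>\n        </div>\n        <section class="reviews">\n            <h2>Customer Reviews (4.8/5 stars)</h2>\n    '
--     review_template = '\n            <div class="review">\n                <div class="reviewer">John D. - Verified Purchase</div>\n                <div class="rating">★★★★★</div>\n                <div class="review-text">Amazing sound quality! The noise cancellation works perfectly for my daily commute. Battery life is exactly as advertised - I charge them once a week with heavy use. Highly recommended for anyone looking for premium wireless headphones.</div>\n            </div>\n    '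
--     footer = '\n        </section>\n        <footer>\n            <div class="footer-links">\n                <a href="/shipping">Shipping Info</a>\n                <a href="/returns">Returns</a>\n                <a href="/support">Support</a>\n                <a href="/warranty">Warranty</a>\n            </div>\n        </footer>\n    </main></body></html>\n    '
--     deficit = size_chars - len(base_content)
--     reps = 0 if deficit <= 0 else -(-deficit // len(review_template))
--     return (base_content + review_template * reps + footer)[:size_chars]
-- ===== Notes on version B (the rewrite author's own statement) =====
-- stated objective: faster
-- what changed: Replaces the quadratic grow-by-repeated-concatenation while loop with a closed-form ceiling-division repeat count, string multiplication and one slice.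
import Mathlib
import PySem

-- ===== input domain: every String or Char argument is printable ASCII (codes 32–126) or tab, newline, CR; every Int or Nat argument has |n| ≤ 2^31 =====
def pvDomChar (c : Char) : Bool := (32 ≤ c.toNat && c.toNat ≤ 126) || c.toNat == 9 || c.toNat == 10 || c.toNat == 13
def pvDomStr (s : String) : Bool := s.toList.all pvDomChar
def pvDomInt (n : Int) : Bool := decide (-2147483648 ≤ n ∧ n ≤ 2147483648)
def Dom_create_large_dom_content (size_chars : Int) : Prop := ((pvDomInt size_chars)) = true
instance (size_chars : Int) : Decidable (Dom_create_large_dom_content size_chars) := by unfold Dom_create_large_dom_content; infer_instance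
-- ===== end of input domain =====

set_option maxRecDepth 20000
set_option maxHeartbeats 1000000


-- B replaces A's quadratic grow-by-append loop with a computed repeat count and a single
-- concatenation (objective: faster, asymptotic).

-- ===== PORT A =====
-- The three string constants of the Python source (shared by both ports; both Pythons spell
-- them out literally).
def pvBase : String := "\n    <html><head><title>E-commerce Product Page</title></head><body>\n    <nav>\n        <ul>\n            <li><a href=\"/home\">Home</a></li>\n            <li><a href=\"/products\">Products</a></li>\n            <li><a href=\"/cart\">Cart (3 items)</a></li>\n            <li><a href=\"/account\">My Account</a></li>\n        </ul>\n    </nav>\n    <main>\n        <div class=\"product-container\">\n            <h1>Premium Wireless Headphones</h1>\n            <div class=\"product-images\">\n                <img src=\"/images/headphones-main.jpg\" alt=\"Main product image\" />\n                <img src=\"/images/headphones-side.jpg\" alt=\"Side view\" />\n                <img src=\"/images/headphones-detail.jpg\" alt=\"Detail view\" />\n            </div>\n            <div class=\"product-details\">\n                <p class=\"price\">$299.99 <span class=\"original\">$399.99</span></p>\n                <p class=\"description\">Experience premium audio quality with these state-of-the-art wireless headphones featuring active noise cancellation, 30-hour battery life, and premium comfort padding.</p>\n                <ul class=\"features\">\n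                    <li>Active Noise Cancellation (ANC)</li>\n                    <li>30-hour battery life with fast charging</li>\n                    <li>Premium memory foam padding</li>\n                    <li>Bluetooth 5.2 connectivity</li>\n                    <li>Touch controls for music and calls</li>\n                    <li>Foldable design for easy travel</li>\n                </ul>\n                <div class=\"buttons\">\n                    <button id=\"add-to-cart\" class=\"primary-btn\">Add to Cart</button>\n                    <button id=\"buy-now\" class=\"secondary-btn\">Buy Now</button>\n                    <button id=\"wishlist\" class=\"icon-btn\">♡ Add to Wishlist</button>\n                </div>\n            </div>\n        </div>\n        <section class=\"reviews\">\n            <h2>Customer Reviews (4.8/5 stars)</h2>\n    "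

def pvTmpl : String := "\n            <div class=\"review\">\n                <div class=\"reviewer\">John D. - Verified Purchase</div>\n                <div class=\"rating\">★★★★★</div>\n                <div class=\"review-text\">Amazing sound quality! The noise cancellation works perfectly for my daily commute. Battery life is exactly as advertised - I charge them once a week with heavy use. Highly recommended for anyone looking for premium wireless headphones.</div>\n            </div>\n    "

def pvFoot : String := "\n        </section>\n        <footer>\n            <div class=\"footer-links\">\n                <a href=\"/shipping\">Shipping Info</a>\n                <a href=\"/returns\">Returns</a>\n                <a href=\"/support\">Support</a>\n                <a href=\"/warranty\">Warranty</a>\n            </div>\n        </footer>\n    </main></body></html>\n    "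

-- length of the review template as a list of code points (= Python len); used for termination
theorem pvTmpl_len_pos : 0 < pvTmpl.toList.length := by decide

-- A's while loop: `while len(current) < size: current += review_template` (on code points)
def pvGrow (size_chars : Int) (cur : List Char) : List Char :=
  if (cur.length : Int) < size_chars then pvGrow size_chars (cur ++ pvTmpl.toList) else cur
  termination_by (size_chars - cur.length).toNat
  decreasing_by
    have := pvTmpl_len_pos
    simp only [List.length_append]
    omega

def create_large_dom_content (size_chars : Int) : String :=
  String.ofList
    (PySem.List.slice (pvGrow size_chars pvBase.toList ++ pvFoot.toList) none (some size_chars))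

-- ===== PORT B =====
-- Python `tmpl * reps`
def pvRepeat (cs : List Char) : Nat → List Char
  | 0 => []
  | k + 1 => cs ++ pvRepeat cs k

def create_large_dom_content_alt (size_chars : Int) : String :=
  let deficit : Int := size_chars - (pvBase.toList.length : Int)
  let reps : Nat :=
    if deficit ≤ 0 then 0
    else (-(PySem.Int.floordiv (-deficit) (pvTmpl.toList.length : Int))).toNat
  String.ofList
    (PySem.List.slice (pvBase.toList ++ pvRepeat pvTmpl.toList reps ++ pvFoot.toList)
      none (some size_chars))

-- ===== PRECONDITION & SPEC =====
def Spec_create_large_dom_content (size_chars : Int) (out : String) : Prop := out = create_large_dom_content_alt size_chars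
instance (size_chars : Int) (out : String) : Decidable (Spec_create_large_dom_content size_chars out) := by unfold Spec_create_large_dom_content; infer_instance

-- ===== CLAIM (what is proved, stated in full; the proofs are below) =====
def Claim_equal_create_large_dom_content : Prop := ∀ (size_chars : Int), Dom_create_large_dom_content size_chars → Spec_create_large_dom_content size_chars (create_large_dom_content size_chars)

-- ===== LEMMAS AND PROOFS =====

-- B's repeat count, as a function of the deficit d = size - len(cur)
def pvReps (d : Int) : Nat :=
  if d ≤ 0 then 0 else (-(PySem.Int.floordiv (-d) (pvTmpl.toList.length : Int))).toNat

theorem pvReps_step (d : Int) (hd : 0 < d) :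
    pvReps d = pvReps (d - (pvTmpl.toList.length : Int)) + 1 := by
  unfold pvReps
  have hL : (0 : Int) < (pvTmpl.toList.length : Int) := by exact_mod_cast pvTmpl_len_pos
  set L : Int := (pvTmpl.toList.length : Int) with hLdef
  rw [if_neg (by omega)]
  by_cases h2 : d - L ≤ 0
  · rw [if_pos h2]
    have h1 : PySem.Int.floordiv (-d) L = -1 := by
      have ha := (PySem.Int.le_floordiv_iff_mul_le (a := -d) (b := L) (q := -1) hL).mpr (by omega)
      have hb := (PySem.Int.floordiv_lt_iff_lt_mul (a := -d) (b := L) (q := 0) hL).mpr (by omega)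
      omega
    rw [h1]; decide
  · rw [if_neg h2]
    have hstep : PySem.Int.floordiv (-(d - L)) L = PySem.Int.floordiv (-d) L + 1 := by
      show Int.fdiv (-(d - L)) L = Int.fdiv (-d) L + 1
      have he : -(d - L) = -d + 1 * L := by ring
      rw [he, Int.add_mul_fdiv_right (-d) 1 (by omega : L ≠ 0)]
    have hnn : PySem.Int.floordiv (-d) L ≤ -1 := by
      have := (PySem.Int.floordiv_lt_iff_lt_mul (a := -d) (b := L) (q := 0) hL).mpr (by omega)
      omega
    rw [hstep]
    omega

theorem pvGrow_eq (size_chars : Int) (cur : List Char) :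
    pvGrow size_chars cur =
      cur ++ pvRepeat pvTmpl.toList (pvReps (size_chars - cur.length)) := by
  induction cur using pvGrow.induct size_chars with
  | case1 cur h ih =>
    rw [pvGrow, if_pos h, ih]
    have hstep : pvReps (size_chars - cur.length) =
        pvReps (size_chars - ((cur ++ pvTmpl.toList).length : Int)) + 1 := by
      have : (((cur ++ pvTmpl.toList).length : Nat) : Int) =
          (cur.length : Int) + (pvTmpl.toList.length : Int) := by
        simp [List.length_append]
      rw [this]
      have harg : size_chars - ((cur.length : Int) + (pvTmpl.toList.length : Int))
          = size_chars - (cur.length : Int) - (pvTmpl.toList.length : Int) := by ring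
      rw [harg]
      exact pvReps_step (size_chars - cur.length) (by omega)
    rw [hstep, pvRepeat, List.append_assoc]
  | case2 cur h =>
    rw [pvGrow, if_neg h]
    have : pvReps (size_chars - cur.length) = 0 := by
      unfold pvReps; rw [if_pos (by omega)]
    rw [this, pvRepeat, List.append_nil]

-- ===== VERDICT (by name: the statement is the Claim_ definition above) =====
theorem create_large_dom_content_spec : Claim_equal_create_large_dom_content := by
  intro size_chars _
  unfold Spec_create_large_dom_content create_large_dom_content create_large_dom_content_alt
  rw [pvGrow_eq]
  rfl
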